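-- pv_equiv track=rewrite | github.com/noveens/reviews4rec | data_scripts/preprocess_random_split.py | get_map_recursive
-- ===== SOURCE A (Python) =====
-- def get_map_recursive(data, key, k_core):
--     counts = {}
--
--     for review in data:
--         if review[key] not in counts: counts[review[key]] = 0
--         counts[review[key]] += 1
--
--     ret = {}
--     now = 0
--
--     for review in data:
--         if review[key] not in ret and counts[review[key]] >= k_core:
--             ret[review[key]] = now
--             now += 1
--
--     return ret
-- ===== SOURCE B (Python) =====
-- def get_map_recursive(data, key, k_core):
--     counts = {}
--     for review in data:
--         counts[review[key]] = counts.get(review[key], 0) + 1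
--     kept = [v for v, c in counts.items() if c >= k_core]
--     return {v: i for i, v in enumerate(kept)}
-- ===== Notes on version B (the rewrite author's own statement) =====
-- stated objective: simpler
-- what changed: The second full scan of data with its 'not in ret' dedup check is replaced by a single walk over the count table's items (dicts preserve first-insertion order), assigning sequential ids to keys with count >= k_core.
import Mathlib
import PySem

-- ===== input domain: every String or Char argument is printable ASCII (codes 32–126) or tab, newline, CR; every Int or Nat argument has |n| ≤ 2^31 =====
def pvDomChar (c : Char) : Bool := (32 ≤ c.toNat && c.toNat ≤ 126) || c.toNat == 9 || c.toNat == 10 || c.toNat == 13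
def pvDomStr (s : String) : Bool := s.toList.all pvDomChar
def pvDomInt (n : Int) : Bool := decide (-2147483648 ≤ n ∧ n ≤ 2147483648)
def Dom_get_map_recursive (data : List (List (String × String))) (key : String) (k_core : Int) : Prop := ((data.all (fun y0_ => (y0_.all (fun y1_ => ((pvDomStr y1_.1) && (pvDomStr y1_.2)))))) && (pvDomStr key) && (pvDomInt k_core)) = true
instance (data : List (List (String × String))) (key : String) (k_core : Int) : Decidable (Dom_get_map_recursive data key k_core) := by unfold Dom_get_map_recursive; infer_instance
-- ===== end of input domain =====

-- B replaces A's second full scan of `data` (with its `not in ret` dedup test) by a single walk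
-- over the count table's items; objective: simpler, same return value.

-- review[key]: first-match lookup; exact under Pre_ (key present in every review, else Python raises KeyError)
def pvKv (review : List (String × String)) (key : String) : String :=
  (PySem.Dict.mk review).getD key ""

-- ===== PORT A =====
def get_map_recursive (data : List (List (String × String))) (key : String) (k_core : Int) : List (String × Int) :=
  let counts := data.foldl (fun d review =>
    let d1 := if d.contains (pvKv review key) = false then d.insert (pvKv review key) 0 else d
    d1.insert (pvKv review key) (d1.getD (pvKv review key) 0 + 1)) PySem.Dict.empty
  let st := data.foldl (fun (st : PySem.Dict String Int × Int) review =>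
    if st.1.contains (pvKv review key) = false ∧ k_core ≤ counts.getD (pvKv review key) 0
    then (st.1.insert (pvKv review key) st.2, st.2 + 1) else st) (PySem.Dict.empty, (0 : Int))
  st.1.items

-- ===== PORT B =====
def get_map_recursive_alt (data : List (List (String × String))) (key : String) (k_core : Int) : List (String × Int) :=
  let counts := data.foldl (fun d review =>
    d.insert (pvKv review key) (d.getD (pvKv review key) 0 + 1)) PySem.Dict.empty
  let kept := (counts.items.filter (fun p => k_core ≤ p.2)).map (·.1)
  ((PySem.List.enumerate kept).foldl (fun d p => d.insert p.2 p.1) PySem.Dict.empty).items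

-- ===== PRECONDITION & SPEC =====
-- Pre_ excludes exactly the inputs on which Python A raises KeyError: a review not containing `key`.
def Pre_get_map_recursive (data : List (List (String × String))) (key : String) (k_core : Int) : Prop :=
  ∀ review ∈ data, (PySem.Dict.mk review).contains key = true
instance (data : List (List (String × String))) (key : String) (k_core : Int) : Decidable (Pre_get_map_recursive data key k_core) := by unfold Pre_get_map_recursive; infer_instance
def pvWitness_get_map_recursive : (List (List (String × String))) × String × Int :=
  ([[("u", "x")], [("u", "x")], [("u", "y")]], "u", 2)

def Spec_get_map_recursive (data : List (List (String × String))) (key : String) (k_core : Int) (out : List (String × Int)) : Prop := out = get_map_recursive_alt data key k_core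
instance (data : List (List (String × String))) (key : String) (k_core : Int) (out : List (String × Int)) : Decidable (Spec_get_map_recursive data key k_core out) := by unfold Spec_get_map_recursive; infer_instance

-- ===== CLAIM (what is proved, stated in full; the proofs are below) =====
def Claim_equal_get_map_recursive : Prop := ∀ (data : List (List (String × String))) (key : String) (k_core : Int), Dom_get_map_recursive data key k_core → Pre_get_map_recursive data key k_core → Spec_get_map_recursive data key k_core (get_map_recursive data key k_core)

-- ===== LEMMAS AND PROOFS =====

-- the id-table both programs build: keys in first-appearance order, sequential ids
def pvTgt (l : List String) : List (String × Int) :=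
  (PySem.List.enumerate l).map (fun p => (p.2, p.1))

theorem pvTgt_keys (l : List String) : (pvTgt l).map (·.1) = l := by
  simp [pvTgt, List.map_map, Function.comp_def, PySem.List.map_snd_enumerate]

theorem pvTgt_append (l : List String) (v : String) :
    pvTgt (l ++ [v]) = pvTgt l ++ [(v, (l.length : Int))] := by
  simp [pvTgt, PySem.List.enumerate_append, PySem.List.enumerate_cons]

theorem mk_contains (L : List (String × Int)) (v : String) :
    (PySem.Dict.mk L).contains v = decide (v ∈ L.map (·.1)) := by
  rw [PySem.Dict.contains_eq_decide_mem_keys]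
  simp [PySem.Dict.keys_mk]

theorem mk_insert_fresh (L : List (String × Int)) (v : String) (n : Int)
    (h : (PySem.Dict.mk L).contains v = false) :
    (PySem.Dict.mk L).insert v n = PySem.Dict.mk (L ++ [(v, n)]) := by
  apply PySem.Dict.ext
  rw [PySem.Dict.items_insert_of_not_contains (h := h)]

-- A's loop state after having seen the set S of keys (counts summarised by c)
def pvStateOf (pb : String → Bool) (S : PySem.Set String) : PySem.Dict String Int × Int :=
  (PySem.Dict.mk (pvTgt (S.filter pb)), ((S.filter pb).length : Int))

theorem pvStep (c : String → Int) (k_core : Int) (S : PySem.Set String) (v : String) :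
    (if (pvStateOf (fun w => decide (k_core ≤ c w)) S).1.contains v = false ∧ k_core ≤ c v
     then ((pvStateOf (fun w => decide (k_core ≤ c w)) S).1.insert v (pvStateOf (fun w => decide (k_core ≤ c w)) S).2,
           (pvStateOf (fun w => decide (k_core ≤ c w)) S).2 + 1)
     else pvStateOf (fun w => decide (k_core ≤ c w)) S)
    = pvStateOf (fun w => decide (k_core ≤ c w)) (PySem.Set.add S v) := by
  have hcont : (pvStateOf (fun w => decide (k_core ≤ c w)) S).1.contains v
      = decide (v ∈ S.filter (fun w => decide (k_core ≤ c w))) := by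
    simp only [pvStateOf]
    rw [mk_contains, pvTgt_keys]
  by_cases hv : v ∈ S
  · have hadd : PySem.Set.add S v = S := by
      simp [PySem.Set.add, PySem.Set.contains, hv]
    rw [hadd]
    by_cases hp : k_core ≤ c v
    · have : (pvStateOf (fun w => decide (k_core ≤ c w)) S).1.contains v = true := by
        rw [hcont]; simp [List.mem_filter, hv, hp]
      simp [this]
    · simp [hp]
  · have hadd : PySem.Set.add S v = S ++ [v] := by
      simp [PySem.Set.add, PySem.Set.contains, hv]
    have hnc : (pvStateOf (fun w => decide (k_core ≤ c w)) S).1.contains v = false := by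
      rw [hcont]
      simp only [decide_eq_false_iff_not]
      intro hmem
      exact hv (List.mem_of_mem_filter hmem)
    rw [hadd]
    by_cases hp : k_core ≤ c v
    · rw [if_pos ⟨hnc, hp⟩]
      have hfil : (S ++ [v]).filter (fun w => decide (k_core ≤ c w))
          = S.filter (fun w => decide (k_core ≤ c w)) ++ [v] := by
        simp [List.filter_append, hp]
      simp only [pvStateOf, hfil, pvTgt_append]
      rw [mk_insert_fresh _ _ _ hnc]
      simp only [Prod.mk.injEq]
      refine ⟨trivial, ?_⟩
      simp
    · rw [if_neg (by tauto)]
      have hfil : (S ++ [v]).filter (fun w => decide (k_core ≤ c w))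
          = S.filter (fun w => decide (k_core ≤ c w)) := by
        simp [List.filter_append, hp]
      simp [pvStateOf, hfil]

theorem pvLoopA (c : String → Int) (k_core : Int) (xs : List String) (S : PySem.Set String) :
    xs.foldl (fun st v =>
      if st.1.contains v = false ∧ k_core ≤ c v then (st.1.insert v st.2, st.2 + 1) else st)
      (pvStateOf (fun w => decide (k_core ≤ c w)) S)
    = pvStateOf (fun w => decide (k_core ≤ c w)) (PySem.Set.update S xs) := by
  induction xs generalizing S with
  | nil => simp [PySem.Set.update]
  | cons v t ih =>
      simp only [List.foldl_cons]
      rw [pvStep c k_core S v, ih]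
      simp [PySem.Set.update]

-- A's first loop (setdefault-style) equals B's one-line counting step, hence Counter
theorem pvCounts_eq (data : List (List (String × String))) (key : String) :
    data.foldl (fun d review =>
      let d1 := if d.contains (pvKv review key) = false then d.insert (pvKv review key) 0 else d
      d1.insert (pvKv review key) (d1.getD (pvKv review key) 0 + 1)) PySem.Dict.empty
    = PySem.Dict.counter (data.map (fun r => pvKv r key)) := by
  rw [← PySem.Dict.foldl_insert_getD_add_one_eq_counter, List.foldl_map]
  apply PySem.List.foldl_congr_mem
  intro d r _
  by_cases h : d.contains (pvKv r key) = false
  · simp [h, PySem.Dict.getD_insert_self, PySem.Dict.insert_insert_self,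
      PySem.Dict.getD_of_not_contains (h := h)]
  · simp only [if_neg h]

-- ===== VERDICT (by name: the statement is the Claim_ definition above) =====
theorem get_map_recursive_spec : Claim_equal_get_map_recursive := by
  intro data key k_core _ _
  unfold Spec_get_map_recursive get_map_recursive get_map_recursive_alt
  simp only [pvCounts_eq]
  set xs := data.map (fun r => pvKv r key) with hxs
  -- B's counting loop is the Counter too
  have hB : data.foldl (fun d review =>
      d.insert (pvKv review key) (d.getD (pvKv review key) 0 + 1)) PySem.Dict.empty
      = PySem.Dict.counter xs := by
    rw [hxs, ← PySem.Dict.foldl_insert_getD_add_one_eq_counter, List.foldl_map]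
  rw [hB]
  -- A's second loop
  have hinit : (PySem.Dict.empty, (0 : Int))
      = pvStateOf (fun w => decide (k_core ≤ (PySem.Dict.counter xs).getD w 0)) ([] : PySem.Set String) := by
    simp [pvStateOf, pvTgt, PySem.List.enumerate_nil, PySem.Dict.empty]
  rw [← List.foldl_map (f := fun r => pvKv r key)
        (g := fun (st : PySem.Dict String Int × Int) v =>
          if st.1.contains v = false ∧ k_core ≤ (PySem.Dict.counter xs).getD v 0
          then (st.1.insert v st.2, st.2 + 1) else st), ← hxs, hinit,
    pvLoopA (fun w => (PySem.Dict.counter xs).getD w 0) k_core xs []]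
  -- B's kept list
  have hkept : (((PySem.Dict.counter xs).items.filter (fun p => k_core ≤ p.2)).map (·.1))
      = (PySem.Set.ofList xs).filter (fun w => decide (k_core ≤ (xs.count w : Int))) := by
    rw [PySem.Dict.items_counter, List.filter_map, List.map_map]
    simp [Function.comp_def]
  rw [hkept]
  -- B's dict comprehension over fresh distinct keys
  have hnodup : ((PySem.Set.ofList xs).filter (fun w => decide (k_core ≤ (xs.count w : Int)))).Nodup :=
    (PySem.Set.nodup_ofList xs).filter _
  have hB2 := PySem.Dict.items_foldl_insert_fresh
    (l := PySem.List.enumerate ((PySem.Set.ofList xs).filter (fun w => decide (k_core ≤ (xs.count w : Int)))))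
    (k := fun p => p.2) (v := fun p => p.1) (d := PySem.Dict.empty)
    (by intro a _; exact PySem.Dict.contains_empty _)
    (by rw [PySem.List.map_snd_enumerate]; exact hnodup)
  rw [hB2]
  -- both sides are pvTgt of the same kept list (getD on the Counter is List.count, a simp fact)
  have hupd : PySem.Set.update ([] : PySem.Set String) xs = PySem.Set.ofList xs := by
    rw [PySem.Set.ofList_eq_foldl]; rfl
  simp [pvStateOf, hupd, pvTgt, PySem.Dict.empty]
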